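-- pv_equiv track=rewrite | github.com/BlazquezMVictor/TFG | openqasm_parser_aprox/main.py | remove_blank_spaces
-- ===== SOURCE A (Python) =====
-- def remove_blank_spaces(code):
--     word_to_exclude_from_starting_code = {"program", "includeStatement"}
--     result = []
--
--     for line in code:
--         line = line.split(" ")
--         line_result = []
--         statement_found = False
--         append = True
--
--         for word in line:
--             if word in word_to_exclude_from_starting_code:
--                 append = False
--                 break
--
--             if statement_found and word != "":
--                 line_result.append(word)
--
--             if not statement_found:
--                 line_result.append(word)
--
--             if not statement_found and word == "statement":
--                 statement_found = True
--
--         if append and statement_found: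
--             result.append(line_result)
--
--     return result
-- ===== SOURCE B (Python) =====
-- def remove_blank_spaces(code):
--     result = []
--     for line in code:
--         words = line.split(" ")
--         if "program" in words or "includeStatement" in words:
--             continue
--         if "statement" not in words:
--             continue
--         i = words.index("statement")
--         result.append(words[:i + 1] + [w for w in words[i + 1:] if w != ""])
--     return result
-- ===== Notes on version B (the rewrite author's own statement) =====
-- stated objective: simpler
-- what changed: Replaced A's per-word stateful loop (statement_found/append flags with a mid-loop break) by a locate-then-slice decomposition: skip lines containing an excluded token or no 'statement', else keep the slice up to the first 'statement' and filter empties from the rest.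
import Mathlib
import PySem

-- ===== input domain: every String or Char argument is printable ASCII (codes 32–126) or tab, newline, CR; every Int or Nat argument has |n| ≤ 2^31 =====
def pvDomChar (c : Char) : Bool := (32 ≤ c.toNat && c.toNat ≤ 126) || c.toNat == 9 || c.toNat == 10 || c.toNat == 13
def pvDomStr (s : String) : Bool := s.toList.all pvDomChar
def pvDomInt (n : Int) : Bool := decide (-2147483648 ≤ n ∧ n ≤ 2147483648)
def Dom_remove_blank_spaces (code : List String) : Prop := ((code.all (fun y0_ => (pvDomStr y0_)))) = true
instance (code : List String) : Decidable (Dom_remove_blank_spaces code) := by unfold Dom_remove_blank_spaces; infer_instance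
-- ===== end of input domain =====

-- B replaces A's stateful per-word loop (flags + mid-loop break) by a locate-then-slice-and-filter
-- decomposition of each line; objective: simpler. Equal return value on every input (both are total).

-- ===== PORT A =====
-- inner 'for word in line' loop of A: state (line_result, statement_found); returns none when the
-- loop breaks (word in exclusion set, append = False), else some (line_result, statement_found)
def rbsA_loop (ws : List String) (line_result : List String) (statement_found : Bool) :
    Option (List String × Bool) :=
  match ws with
  | [] => some (line_result, statement_found)
  | w :: rest =>
    if w == "program" || w == "includeStatement" then
      none
    else
      let line_result := if statement_found && w != "" then line_result ++ [w] else line_result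
      let line_result := if !statement_found then line_result ++ [w] else line_result
      let statement_found := if !statement_found && w == "statement" then true else statement_found
      rbsA_loop rest line_result statement_found

def remove_blank_spaces (code : List String) : List (List String) :=
  code.foldl (fun result line =>
    match rbsA_loop ((PySem.Str.split? line " ").getD []) [] false with
    | none => result                                   -- append = False
    | some (line_result, statement_found) =>
        if statement_found then result ++ [line_result] else result) []

-- ===== PORT B =====
def remove_blank_spaces_alt (code : List String) : List (List String) :=
  code.foldl (fun result line =>
    let words := (PySem.Str.split? line " ").getD []
    if words.contains "program" || words.contains "includeStatement" then result
    else if !(words.contains "statement") then result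
    else
      match PySem.List.index? words "statement" with
      | none => result  -- unreachable: "statement" ∈ words
      | some i =>
          result ++ [PySem.List.slice words none (some ((i : Int) + 1)) ++
                     (PySem.List.slice words (some ((i : Int) + 1)) none).filter (· != "")]) []

-- ===== PRECONDITION & SPEC =====
def Spec_remove_blank_spaces (code : List String) (out : List (List String)) : Prop := out = remove_blank_spaces_alt code
instance (code : List String) (out : List (List String)) : Decidable (Spec_remove_blank_spaces code out) := by unfold Spec_remove_blank_spaces; infer_instance

-- ===== CLAIM (what is proved, stated in full; the proofs are below) =====
def Claim_equal_remove_blank_spaces : Prop := ∀ (code : List String), Dom_remove_blank_spaces code → Spec_remove_blank_spaces code (remove_blank_spaces code)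

-- ===== LEMMAS AND PROOFS =====

-- excluded-token test, shared shape of both characterisations
def rbsExcl (w : String) : Bool := w == "program" || w == "includeStatement"

-- after 'statement' was found: A's loop keeps exactly the non-empty words, unless it breaks
lemma rbsA_loop_true (ws acc : List String) :
    rbsA_loop ws acc true =
      if ws.any rbsExcl then none else some (acc ++ ws.filter (· != ""), true) := by
  induction ws generalizing acc with
  | nil => simp [rbsA_loop]
  | cons w rest ih =>
    by_cases hb : rbsExcl w = true
    · simp [rbsA_loop, rbsExcl] at hb ⊢
      simp [hb]
    · have hb' : (w == "program" || w == "includeStatement") = false := by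
        simpa [rbsExcl] using hb
      by_cases he : (w != "") = true
      · simp [rbsA_loop, hb', he, ih, List.any_cons, rbsExcl,
          List.append_assoc]
      · simp [rbsA_loop, hb', he, ih, List.any_cons, rbsExcl]

-- before 'statement' was found: break on an excluded word, else locate the first 'statement'
lemma rbsA_loop_false (ws acc : List String) :
    rbsA_loop ws acc false =
      if ws.any rbsExcl then none
      else match PySem.List.index? ws "statement" with
        | none => some (acc ++ ws, false)
        | some i => some (acc ++ ws.take (i + 1) ++ (ws.drop (i + 1)).filter (· != ""), true) := by
  induction ws generalizing acc with
  | nil => simp [rbsA_loop, PySem.List.index?]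
  | cons w rest ih =>
    by_cases hb : rbsExcl w = true
    · simp [rbsA_loop, rbsExcl] at hb ⊢
      simp [hb]
    · have hb' : (w == "program" || w == "includeStatement") = false := by
        simpa [rbsExcl] using hb
      by_cases hs : w = "statement"
      · subst hs
        rw [PySem.List.index?_cons_self]
        simp [rbsA_loop, rbsA_loop_true, List.any_cons, hb, List.append_assoc]
      · rw [PySem.List.index?_cons_of_ne rest hs]
        have hsb : (w == "statement") = false := by simpa using hs
        rw [show rbsA_loop (w :: rest) acc false = rbsA_loop rest (acc ++ [w]) false from by
          simp [rbsA_loop, hb', hsb]]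
        rw [ih]
        by_cases hx : rest.any rbsExcl = true
        · simp [List.any_cons, hx]
        · cases hidx : PySem.List.index? rest "statement" with
          | none => simp [List.any_cons, hx, hb, List.append_assoc]
          | some i =>
            simp [List.any_cons, hx, hb, List.take_succ_cons, List.drop_succ_cons,
              List.append_assoc]

-- the any-over-words exclusion test equals B's two membership tests
lemma rbsExcl_any (ws : List String) :
    ws.any rbsExcl = (ws.contains "program" || ws.contains "includeStatement") := by
  rw [Bool.eq_iff_iff]
  simp only [List.any_eq_true, Bool.or_eq_true, List.contains_iff_mem, rbsExcl,
    beq_iff_eq]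
  aesop

-- per-line agreement of the two fold bodies
lemma rbs_line_eq (result : List (List String)) (line : String) :
    (match rbsA_loop ((PySem.Str.split? line " ").getD []) [] false with
      | none => result
      | some (lr, sf) => if sf then result ++ [lr] else result) =
    (let words := (PySem.Str.split? line " ").getD []
     if words.contains "program" || words.contains "includeStatement" then result
     else if !(words.contains "statement") then result
     else
       match PySem.List.index? words "statement" with
       | none => result
       | some i =>
           result ++ [PySem.List.slice words none (some ((i : Int) + 1)) ++
                      (PySem.List.slice words (some ((i : Int) + 1)) none).filter (· != "")]) := by
  set ws := (PySem.Str.split? line " ").getD [] with hws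
  rw [rbsA_loop_false, rbsExcl_any ws]
  by_cases hx : ("program" ∈ ws ∨ "includeStatement" ∈ ws)
  · simp [hx]
  · cases hidx : PySem.List.index? ws "statement" with
    | none =>
      have hnc : "statement" ∉ ws := (PySem.List.index?_eq_none_iff ws "statement").mp hidx
      simp [hx, hnc]
    | some i =>
      have hc : "statement" ∈ ws :=
        (PySem.List.index?_isSome_iff ws "statement").mp (by
          rw [PySem.List.index?_eq_idxOf?] at hidx ⊢; simp [hidx])
      have hsl1 : PySem.List.slice ws none (some ((i : Int) + 1)) = ws.take (i + 1) := by
        have h := PySem.List.slice_to_natCast ws (i + 1)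
        rw [← h]; norm_cast
      have hsl2 : PySem.List.slice ws (some ((i : Int) + 1)) none = ws.drop (i + 1) := by
        have h := PySem.List.slice_from_natCast ws (i + 1)
        rw [← h]; norm_cast
      rw [PySem.List.index?_eq_idxOf?] at hidx
      simp [hx, hc, hidx, hsl1, hsl2]

-- the two folds agree on every code list (no domain hypothesis needed)
lemma rbs_fold_eq (code : List String) :
    remove_blank_spaces code = remove_blank_spaces_alt code := by
  unfold remove_blank_spaces remove_blank_spaces_alt
  induction code using List.reverseRecOn with
  | nil => rfl
  | append_singleton rest line ih =>
    rw [List.foldl_append, List.foldl_append, ih]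
    simp only [List.foldl_cons, List.foldl_nil]
    exact rbs_line_eq _ line

-- ===== VERDICT (by name: the statement is the Claim_ definition above) =====
theorem remove_blank_spaces_spec : Claim_equal_remove_blank_spaces := by
  intro code _
  exact rbs_fold_eq code
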